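-- pv_equiv track=rewrite | github.com/siemens/OOASP | benchmarks/singleshot/autorun.py | generate_ids
-- ===== SOURCE A (Python) =====
-- from typing import List, Annotated
--
-- ELEMENT_NAMES = 'ABCD'
--
-- ELEMENT_TYPES = len(ELEMENT_NAMES)
--
-- def generate_ids(n: int) -> List[str]:
--     """
--     Generates combinations of element definitions
--     with suitable IDs.
--     :param n: int, number of elements of each type (e.g. for iteration 4, n=4)
--     :return: list of fact representations strings
--     """
--
--     ids = [id+1 for id in range(ELEMENT_TYPES*n)]
--     assigned = [ids[i*n:i*n+n] for i in range(ELEMENT_TYPES)]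
--     partial_config_facts = []
--
--     for element_index, object_ids in enumerate(assigned):
--         for id in object_ids:
--             partial_config_facts.append(f"user(ooasp_isa(element{ELEMENT_NAMES[element_index]},{id})).")
--
--     return partial_config_facts
-- ===== SOURCE B (Python) =====
-- ELEMENT_NAMES = 'ABCD'
--
-- ELEMENT_TYPES = len(ELEMENT_NAMES)
--
-- def generate_ids(n: int):
--     facts = []
--     for i in range(ELEMENT_TYPES * n):
--         facts.append(f"user(ooasp_isa(element{ELEMENT_NAMES[i // n]},{i + 1})).")
--     return facts
-- ===== Notes on version B (the rewrite author's own statement) =====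
-- stated objective: simpler
-- what changed: Replaces A's build-id-list / slice-into-chunks / nested enumerate loop with a single flat pass over range(4*n) where the element name is chosen arithmetically by i // n.
import Mathlib
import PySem

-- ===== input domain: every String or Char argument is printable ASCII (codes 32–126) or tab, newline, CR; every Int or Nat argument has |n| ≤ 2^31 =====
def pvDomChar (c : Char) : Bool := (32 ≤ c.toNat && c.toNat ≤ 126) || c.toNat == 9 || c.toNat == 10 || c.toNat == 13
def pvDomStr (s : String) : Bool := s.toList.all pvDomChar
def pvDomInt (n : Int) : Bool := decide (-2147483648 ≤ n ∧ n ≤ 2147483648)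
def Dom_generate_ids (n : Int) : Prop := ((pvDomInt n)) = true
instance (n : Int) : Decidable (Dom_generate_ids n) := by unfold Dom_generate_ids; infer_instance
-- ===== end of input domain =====

-- B replaces A's id-list / slice-into-chunks / nested-loop pipeline by one flat pass whose
-- element name is chosen arithmetically (i // n); objective: simpler.

-- ===== PORT A =====
def pvELEMENT_NAMES : String := "ABCD"
def pvELEMENT_TYPES : Int := (PySem.Str.len pvELEMENT_NAMES : Int)

-- the f-string both Pythons build, step for step ('name' is the 1-char string s[i])
def pvFact (name : Char) (id : Int) : String :=
  "user(ooasp_isa(element" ++ String.ofList [name] ++ "," ++ PySem.Int.toStr id ++ "))."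

def generate_ids (n : Int) : List String :=
  let ids := (PySem.List.pyRange 0 (pvELEMENT_TYPES * n)).map (fun id => id + 1)
  let assigned := (PySem.List.pyRange 0 pvELEMENT_TYPES).map
      (fun i => PySem.List.slice ids (some (i * n)) (some (i * n + n)))
  (PySem.List.enumerate assigned).foldl (fun acc p =>
      p.2.foldl (fun acc2 id =>
        acc2 ++ [pvFact ((PySem.Str.pyGet? pvELEMENT_NAMES p.1).getD '?') id]) acc) []

-- ===== PORT B =====
def generate_ids_alt (n : Int) : List String :=
  (PySem.List.pyRange 0 (pvELEMENT_TYPES * n)).foldl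
    (fun facts i =>
      facts ++ [pvFact ((PySem.Str.pyGet? pvELEMENT_NAMES (PySem.Int.floordiv i n)).getD '?')
                       (i + 1)]) []

-- ===== PRECONDITION & SPEC =====
def Spec_generate_ids (n : Int) (out : List String) : Prop := out = generate_ids_alt n
instance (n : Int) (out : List String) : Decidable (Spec_generate_ids n out) := by unfold Spec_generate_ids; infer_instance

-- ===== CLAIM (what is proved, stated in full; the proofs are below) =====
def Claim_equal_generate_ids : Prop := ∀ (n : Int), Dom_generate_ids n → Spec_generate_ids n (generate_ids n)

-- ===== LEMMAS AND PROOFS =====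

theorem pyRange_nonpos (m : Int) (h : m ≤ 0) : PySem.List.pyRange 0 m = [] := by
  simp [PySem.List.pyRange]; omega

theorem slice_nil (a b : Option Int) : PySem.List.slice ([] : List Int) a b = [] := by
  simp [PySem.List.slice]

theorem drop_take_range (a b m : ℕ) (h : a + b ≤ m) : ((List.range m).drop a).take b = List.range' a b := by
  apply List.ext_getElem
  · simp; omega
  · intro i h1 h2
    simp [List.getElem_range']

theorem range_split4 (k : ℕ) : List.range' (0*k) k ++ List.range' (1*k) k ++ List.range' (2*k) k ++ List.range' (3*k) k = List.range (4*k) := by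
  apply List.ext_getElem
  · simp; omega
  · intro i h1 h2
    simp [List.getElem_append, List.getElem_range', List.getElem_range]
    split_ifs <;> omega

theorem slice_chunk (k a : ℕ) (x y : Int) (hx : x = ↑a) (hy : y = ↑a + ↑k) (h : a + k ≤ 4*k) :
    PySem.List.slice ((List.range (4*k)).map (fun j : ℕ => ((j:Int) + 1))) (some x) (some y)
    = (List.range' a k).map (fun j : ℕ => ((j:Int)+1)) := by
  subst hx hy
  have hy' : ((a:Int) + (k:Int)) = ((a + k : ℕ) : Int) := by push_cast; ring
  rw [hy', PySem.List.slice_natCast, ← List.map_drop, ← List.map_take, Nat.add_sub_cancel_left,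
      drop_take_range a k (4*k) h]

theorem chunk_eq (k E : ℕ) (c : Char) (hc : (PySem.Str.pyGet? pvELEMENT_NAMES ((E : ℕ) : Int)).getD '?' = c) :
    List.map (pvFact c) (List.map (fun j : ℕ => ((j:Int)+1)) (List.range' (E*k) k)) =
    List.map (fun j : ℕ => pvFact ((PySem.Str.pyGet? pvELEMENT_NAMES (PySem.Int.floordiv (↑j) (↑k))).getD '?') ((j:Int)+1)) (List.range' (E*k) k) := by
  rw [List.map_map]
  apply List.map_congr_left
  intro j hj
  rw [List.mem_range'_1] at hj
  have hdiv : j / k = E := Nat.div_eq_of_lt_le (by omega) (by rw [Nat.succ_mul]; omega)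
  simp only [Function.comp_def, PySem.Int.floordiv_natCast, hdiv, hc]

theorem pvTYPES_eq : pvELEMENT_TYPES = 4 := by decide

theorem generate_ids_main (n : Int) : generate_ids n = generate_ids_alt n := by
  by_cases hn : n ≤ 0
  · have h4 : pvELEMENT_TYPES * n ≤ 0 := by rw [pvTYPES_eq]; omega
    have hr4 : PySem.List.pyRange 0 pvELEMENT_TYPES = [0,1,2,3] := by decide
    rw [generate_ids, generate_ids_alt, pyRange_nonpos _ h4, hr4]
    simp [slice_nil, PySem.List.enumerate, List.foldl]
  · have hn' : (0:Int) < n := by omega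
    obtain ⟨k, rfl⟩ : ∃ k : ℕ, n = (k : Int) := ⟨n.toNat, (Int.toNat_of_nonneg hn'.le).symm⟩
    have hcast : pvELEMENT_TYPES * (k : Int) = ((4 * k : ℕ) : Int) := by
      rw [pvTYPES_eq]; push_cast; ring
    have hr4 : PySem.List.pyRange 0 pvELEMENT_TYPES = [0,1,2,3] := by decide
    rw [generate_ids, generate_ids_alt, hcast, PySem.List.pyRange_zero_natCast, hr4]
    simp only [PySem.List.enumerate, List.map_cons, List.map_nil, List.foldl_cons, List.foldl_nil, PySem.List.foldl_append_singleton_eq_map, List.map_map, Function.comp_def, List.nil_append]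
    rw [slice_chunk k (0*k) _ _ (by push_cast; ring) (by push_cast; ring) (by omega),
        slice_chunk k (1*k) _ _ (by push_cast; ring) (by push_cast; ring) (by omega),
        slice_chunk k (2*k) _ _ (by push_cast; ring) (by push_cast; ring) (by omega),
        slice_chunk k (3*k) _ _ (by push_cast; ring) (by push_cast; ring) (by omega)]
    rw [show (PySem.Str.pyGet? pvELEMENT_NAMES 0).getD '?' = 'A' from by decide,
        show (PySem.Str.pyGet? pvELEMENT_NAMES (0+1)).getD '?' = 'B' from by decide,
        show (PySem.Str.pyGet? pvELEMENT_NAMES (0+1+1)).getD '?' = 'C' from by decide,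
        show (PySem.Str.pyGet? pvELEMENT_NAMES (0+1+1+1)).getD '?' = 'D' from by decide,
        chunk_eq k 0 'A' (by decide), chunk_eq k 1 'B' (by decide),
        chunk_eq k 2 'C' (by decide), chunk_eq k 3 'D' (by decide),
        ← range_split4 k]
    simp [List.map_append]


-- ===== VERDICT (by name: the statement is the Claim_ definition above) =====
theorem generate_ids_spec : Claim_equal_generate_ids := by
  intro n _
  exact generate_ids_main n
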